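-- pv_equiv track=rewrite | github.com/linhdvu14/cp-sols | sols/CodeForces/1829_d4/H_Don_t_Blame_Me.py | solve
-- ===== SOURCE A (Python) =====
-- MOD = 10**9 + 7
--
-- BITS = 6
--
-- def solve(N, K, A):
--     dp = [0] * (1 << BITS)
--
--     for a in A:
--         ndp = dp[:]
--         ndp[a] += 1
--         for m in range(1 << BITS): ndp[m & a] = (ndp[m & a] + dp[m]) % MOD
--         dp = ndp
--
--     res = 0
--     for m in range(1 << BITS):
--         if bin(m).count('1') == K:
--             res = (res + dp[m]) % MOD
--
--     return res
-- ===== SOURCE B (Python) =====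
-- MOD = 10**9 + 7
--
-- BITS = 6
--
--
-- def popcount(x):
--     c = 0
--     while x:
--         c += x & 1
--         x >>= 1
--     return c
--
--
-- def solve(N, K, A):
--     M = 1 << BITS
--     # g[m] = number of array elements whose bit pattern covers m
--     g = [sum(1 for a in A if a & m == m) for m in range(M)]
--     # S[m] = number of non-empty subsequences whose AND is a superset of m
--     S = [(pow(2, g[m], MOD) - 1) % MOD for m in range(M)]
--     # inclusion-exclusion on the subset lattice: exact count for each mask m
--     res = 0
--     for m in range(M):
--         if popcount(m) != K:
--             continue
--         acc = 0
--         for t in range(M):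
--             if t & m == m:
--                 if (popcount(t) - popcount(m)) % 2 == 0:
--                     acc = (acc + S[t]) % MOD
--                 else:
--                     acc = (acc - S[t]) % MOD
--         res = (res + acc) % MOD
--     return res
-- ===== Notes on version B (the rewrite author's own statement) =====
-- stated objective: alternative
-- what changed: Replaces the per-element subset-lattice DP (64 updates per array element, answer read off dp) by counting, for every 6-bit mask m, the elements covering m, turning those counts into 2^g-1 superset-subsequence counts, and recovering exact AND counts by inclusion-exclusion over the subset lattice.
import Mathlib
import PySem

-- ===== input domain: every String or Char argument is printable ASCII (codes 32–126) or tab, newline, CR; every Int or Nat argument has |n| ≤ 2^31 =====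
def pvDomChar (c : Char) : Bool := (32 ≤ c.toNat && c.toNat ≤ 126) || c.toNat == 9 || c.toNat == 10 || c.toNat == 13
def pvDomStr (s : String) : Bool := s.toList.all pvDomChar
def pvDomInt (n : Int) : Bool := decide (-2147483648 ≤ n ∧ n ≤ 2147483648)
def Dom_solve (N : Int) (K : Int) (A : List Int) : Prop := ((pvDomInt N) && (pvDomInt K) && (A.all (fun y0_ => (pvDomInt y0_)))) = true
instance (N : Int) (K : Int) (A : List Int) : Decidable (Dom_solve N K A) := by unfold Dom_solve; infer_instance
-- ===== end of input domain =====

-- B replaces A's per-element subset-lattice DP by superset counting + inclusion–exclusion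
-- over the 6-bit subset lattice (a different algorithm of the same cost; return values proved equal).

-- ===== PORT A =====

def pvMOD : Int := 1000000007   -- MOD = 10**9 + 7

-- bin(m).count('1')  (count of '1' digits of the binary expansion; exact for the m ≥ 0 it is applied to)
def pcA (n : Nat) : Int :=
  if n = 0 then 0 else ((n % 2 : Nat) : Int) + pcA (n / 2)
decreasing_by exact Nat.div_lt_self (Nat.pos_of_ne_zero (by omega)) (by omega)

-- loop body of 'for a in A': ndp = dp[:]; ndp[a] += 1; for m in range(1 << BITS): ndp[m & a] = (ndp[m & a] + dp[m]) % MOD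
def solveStep (dp : List Int) (a : Int) : List Int :=
  let ndp := PySem.List.pySetD dp a (PySem.List.pyGetD dp a 0 + 1)
  (PySem.List.pyRange 0 64 1).foldl
    (fun nd m =>
      PySem.List.pySetD nd (PySem.Int.band m a)
        ((PySem.List.pyGetD nd (PySem.Int.band m a) 0 + PySem.List.pyGetD dp m 0) % pvMOD))
    ndp

def solve (N : Int) (K : Int) (A : List Int) : Int :=
  let dp := A.foldl solveStep (List.replicate 64 0)   -- [0] * (1 << BITS)
  (PySem.List.pyRange 0 64 1).foldl
    (fun res m => if pcA m.toNat == K then (res + PySem.List.pyGetD dp m 0) % pvMOD else res)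
    0

-- ===== PORT B =====

-- popcount's 'while x: c += x & 1; x >>= 1' (exact for the x ≥ 0 it is applied to)
def pcB (x : Nat) (c : Int) : Int :=
  if x = 0 then c else pcB (x / 2) (c + ((x % 2 : Nat) : Int))
decreasing_by exact Nat.div_lt_self (Nat.pos_of_ne_zero (by omega)) (by omega)

def solve_alt (N : Int) (K : Int) (A : List Int) : Int :=
  -- g = [sum(1 for a in A if a & m == m) for m in range(M)]
  let g : List Int := (PySem.List.pyRange 0 64 1).map
    (fun m => A.foldl (fun c a => if PySem.Int.band a m == m then c + 1 else c) 0)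
  -- S = [(pow(2, g[m], MOD) - 1) % MOD for m in range(M)]
  let S : List Int := (PySem.List.pyRange 0 64 1).map
    (fun m => ((2 : Int) ^ (PySem.List.pyGetD g m 0).toNat % pvMOD - 1) % pvMOD)
  (PySem.List.pyRange 0 64 1).foldl
    (fun res m =>
      if pcB m.toNat 0 == K then
        (res + (PySem.List.pyRange 0 64 1).foldl
          (fun acc t =>
            if PySem.Int.band t m == m then
              if (pcB t.toNat 0 - pcB m.toNat 0) % 2 == 0 then
                (acc + PySem.List.pyGetD S t 0) % pvMOD
              else
                (acc - PySem.List.pyGetD S t 0) % pvMOD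
            else acc)
          0) % pvMOD
      else res)
    0

-- ===== PRECONDITION & SPEC =====

-- Pre_ excludes exactly the inputs on which A raises IndexError: some element outside [-64, 64)
-- (dp has length 64 = 1 << BITS, so dp[a] accepts precisely the Python indices -64 ≤ a < 64).
def Pre_solve (N : Int) (K : Int) (A : List Int) : Prop := ∀ a ∈ A, -64 ≤ a ∧ a < 64
instance (N : Int) (K : Int) (A : List Int) : Decidable (Pre_solve N K A) := by unfold Pre_solve; infer_instance

def pvWitness_solve : Int × Int × List Int := (3, 1, [1, 2, 3])

def Spec_solve (N : Int) (K : Int) (A : List Int) (out : Int) : Prop := out = solve_alt N K A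
instance (N : Int) (K : Int) (A : List Int) (out : Int) : Decidable (Spec_solve N K A out) := by unfold Spec_solve; infer_instance

-- ===== CLAIM (what is proved, stated in full; the proofs are below) =====
def Claim_equal_solve : Prop := ∀ (N : Int) (K : Int) (A : List Int), Dom_solve N K A → Pre_solve N K A → Spec_solve N K A (solve N K A)

-- ===== LEMMAS AND PROOFS =====

-- spec-level definitions (used only by the proofs)

-- popcount of a 6-bit mask, in closed arithmetic form (kernel-reducible)
def pc6 (n : Nat) : Nat := n % 2 + n / 2 % 2 + n / 4 % 2 + n / 8 % 2 + n / 16 % 2 + n / 32 % 2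

-- the inclusion-exclusion sign (+1 / -1) attached to pair (t, m)
def sgZ (t m : Nat) : Int := if (pc6 t + pc6 m) % 2 = 0 then 1 else -1

-- the 6-bit class of an array element: Python indexing and '&' against 6-bit masks
-- see an element a ∈ [-64, 64) exactly as a % 64
def jm (a : Int) : Nat := (a % 64).toNat

-- exact (un-reduced) subsequence count: one step of A's DP recurrence over ℕ
def estep (f : Nat → Nat) (a : Int) : Nat → Nat := fun t =>
  f t + (if jm a = t then 1 else 0) + ∑ s ∈ Finset.range 64, (if s &&& jm a = t then f s else 0)

-- E P t = number of non-empty subsequences of P whose AND-class is t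
def E (P : List Int) : Nat → Nat := P.foldl estep (fun _ => 0)

-- cnt P m = number of elements of P whose class covers m
def cnt (P : List Int) (m : Nat) : Nat := P.countP (fun a => jm a &&& m == m)

-- zeta transform of f over the subset lattice
def zsum (f : Nat → Nat) (m : Nat) : Nat := ∑ t ∈ Finset.range 64, (if m &&& t = m then f t else 0)

-- the common normal form both ports are proved equal to
def resSpec (K : Int) (A : List Int) : Int :=
  (∑ m ∈ Finset.range 64, (if ((pc6 m : Int) == K) = true then (E A m : Int) % pvMOD else 0)) % pvMOD

-- ---- decided finite facts about 6-bit masks ----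

set_option maxRecDepth 1000000 in
set_option maxHeartbeats 4000000 in
theorem K2 : ∀ d ∈ Finset.range 64, (∑ u ∈ Finset.range 64,
    (if u &&& d = u then (if pc6 u % 2 = 0 then (1 : Int) else -1) else 0)) = if d = 0 then 1 else 0 := by
  decide

set_option maxRecDepth 1000000 in
set_option maxHeartbeats 4000000 in
theorem XORP : ∀ t ∈ Finset.range 64, ∀ m ∈ Finset.range 64,
    (t ^^^ m) < 64 ∧ pc6 (t ^^^ m) % 2 = (pc6 t + pc6 m) % 2 := by decide

set_option maxRecDepth 1000000 in
set_option maxHeartbeats 4000000 in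
theorem LNneg : ∀ mn ∈ Finset.range 64, ∀ k ∈ Finset.range 64,
    PySem.Int.band (mn : Int) ((k : Int) - 64) = ((mn &&& jm ((k : Int) - 64) : Nat) : Int) := by decide

-- ---- small helpers ----

theorem jm_lt (a : Int) : jm a < 64 := by unfold jm; omega

theorem jm_of_nonneg (a : Int) (h0 : 0 ≤ a) (h1 : a < 64) : jm a = a.toNat := by unfold jm; omega

theorem land_eq_self_iff (x y : Nat) : x &&& y = x ↔ ∀ i, x.testBit i = true → y.testBit i = true := by
  constructor
  · intro h i hx
    have h2 := congrArg (fun z => Nat.testBit z i) h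
    simp only [Nat.testBit_land, hx, Bool.true_and] at h2
    exact h2
  · intro h
    apply Nat.eq_of_testBit_eq
    intro i
    rw [Nat.testBit_land]
    cases hx : x.testBit i
    · simp
    · simp [h i hx]

theorem sub_land_iff (m s j : Nat) : m &&& (s &&& j) = m ↔ (m &&& s = m ∧ m &&& j = m) := by
  simp only [land_eq_self_iff, Nat.testBit_land]
  constructor
  · intro h
    exact ⟨fun i hi => ((Bool.and_eq_true _ _).mp (h i hi)).1,
           fun i hi => ((Bool.and_eq_true _ _).mp (h i hi)).2⟩
  · rintro ⟨h1, h2⟩ i hi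
    rw [h1 i hi, h2 i hi]
    rfl

theorem band_norm (m a : Int) (h0 : 0 ≤ m) (h1 : m < 64) (h2 : -64 ≤ a) (h3 : a < 64) :
    PySem.Int.band m a = ((m.toNat &&& jm a : Nat) : Int) := by
  by_cases ha : 0 ≤ a
  · have hm : m = ((m.toNat : Nat) : Int) := by omega
    have haa : a = ((a.toNat : Nat) : Int) := by omega
    have hb : PySem.Int.band m a = ((m.toNat &&& a.toNat : Nat) : Int) := by
      conv_lhs => rw [hm, haa]
      exact PySem.Int.band_natCast m.toNat a.toNat
    rw [hb, jm_of_nonneg a ha h3]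
  · obtain ⟨k, hk1, hk2⟩ : ∃ k : Nat, k < 64 ∧ a = (k : Int) - 64 := ⟨(a + 64).toNat, by omega, by omega⟩
    have hm : m = ((m.toNat : Nat) : Int) := by omega
    have h := LNneg m.toNat (Finset.mem_range.mpr (by omega)) k (Finset.mem_range.mpr hk1)
    rw [← hm, ← hk2] at h
    exact h

-- xor transfer facts, proved bitwise (used by the Möbius reindexing)
theorem TB1 (m s x : Nat) (h1 : m &&& x = m) (h2 : x &&& s = x) :
    (x ^^^ m) &&& (s ^^^ m) = x ^^^ m := by
  rw [land_eq_self_iff] at *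
  intro i hi
  rw [Nat.testBit_xor] at hi ⊢
  have h1i := h1 i
  have h2i := h2 i
  cases hmi : m.testBit i <;> cases hxi : x.testBit i <;> cases hsi : s.testBit i <;> simp_all

theorem TB2a (m s x : Nat) (h1 : m &&& s = m) (h2 : x &&& (s ^^^ m) = x) :
    m &&& (x ^^^ m) = m := by
  rw [land_eq_self_iff] at *
  intro i hi
  rw [Nat.testBit_xor]
  have h1i := h1 i
  have h2i := h2 i
  rw [Nat.testBit_xor] at h2i
  cases hmi : m.testBit i <;> cases hxi : x.testBit i <;> cases hsi : s.testBit i <;> simp_all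

theorem TB2b (m s x : Nat) (h1 : m &&& s = m) (h2 : x &&& (s ^^^ m) = x) :
    (x ^^^ m) &&& s = x ^^^ m := by
  rw [land_eq_self_iff] at *
  intro i hi
  rw [Nat.testBit_xor] at hi
  have h1i := h1 i
  have h2i := h2 i
  rw [Nat.testBit_xor] at h2i
  cases hmi : m.testBit i <;> cases hxi : x.testBit i <;> cases hsi : s.testBit i <;> simp_all

theorem pcA_eq_pc6 (n : Nat) (h : n < 64) : pcA n = (pc6 n : Int) := by
  induction n using Nat.strong_induction_on with
  | _ n ih =>
    rw [pcA]
    by_cases h0 : n = 0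
    · simp [h0, pc6]
    · rw [if_neg h0, ih (n / 2) (by omega) (by omega)]
      have : (n % 2 : Nat) + pc6 (n / 2) = pc6 n := by unfold pc6; omega
      push_cast [← this]
      ring

theorem pcB_eq_pc6 (n : Nat) (h : n < 64) : ∀ c : Int, pcB n c = c + (pc6 n : Int) := by
  induction n using Nat.strong_induction_on with
  | _ n ih =>
    intro c
    rw [pcB]
    by_cases h0 : n = 0
    · simp [h0, pc6]
    · rw [if_neg h0, ih (n / 2) (by omega) (by omega)]
      have : (n % 2 : Nat) + pc6 (n / 2) = pc6 n := by unfold pc6; omega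
      push_cast [← this]
      ring

-- ---- sequential mod-sums ----

def seqAdd (x : Int) (ds : List Int) : Int := ds.foldl (fun r d => (r + d) % pvMOD) x

theorem seqAdd_eq (ds : List Int) : ∀ x : Int,
    seqAdd x ds = if ds = [] then x else (x + ds.sum) % pvMOD := by
  induction ds with
  | nil => intro x; simp [seqAdd]
  | cons d tl ih =>
    intro x
    have : seqAdd x (d :: tl) = seqAdd ((x + d) % pvMOD) tl := rfl
    rw [this, ih]
    by_cases h : tl = []
    · simp [h]
    · rw [if_neg h, if_neg (by simp)]
      simp only [List.sum_cons, pvMOD]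
      omega

theorem getD_set_self (l : List Int) (i : Nat) (v : Int) (h : i < l.length) :
    (l.set i v).getD i 0 = v := by simp [List.getD, h]

theorem getD_set_ne (l : List Int) (i j : Nat) (v : Int) (h : i ≠ j) :
    (l.set i v).getD j 0 = l.getD j 0 := by simp [List.getD, List.getElem?_set_ne h]

theorem foldl_range_sum (n : Nat) (p : Nat → Prop) [DecidablePred p] (v : Nat → Int) :
    ∀ x : Int, (List.range n).foldl (fun r k => if p k then (r + v k) % pvMOD else r) (x % pvMOD)
      = (x + ∑ k ∈ Finset.range n, (if p k then v k else 0)) % pvMOD := by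
  induction n with
  | zero => intro x; simp
  | succ n ih =>
    intro x
    rw [List.range_succ, List.foldl_append, ih, Finset.sum_range_succ]
    by_cases h : p n
    · simp only [List.foldl_cons, List.foldl_nil, if_pos h, pvMOD]
      omega
    · simp [h]

theorem foldl_pyRange64 (f : Int → Int → Int) (x : Int) :
    (PySem.List.pyRange 0 64 1).foldl f x
      = (List.range 64).foldl (fun (r : Int) (k : Nat) => f r (k : Int)) x := by
  rw [PySem.List.pyRange_one]
  have h1 : ((64 : Int) - 0).toNat = 64 := rfl
  rw [h1, List.foldl_map]
  simp only [zero_add]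

theorem list_filter_map_sum (n : Nat) (q : Nat → Bool) (v : Nat → Int) :
    (((List.range n).filter q).map v).sum = ∑ k ∈ Finset.range n, (if q k then v k else 0) := by
  induction n with
  | zero => simp
  | succ n ih =>
    rw [List.range_succ, List.filter_append, List.map_append, List.sum_append, ih,
      Finset.sum_range_succ]
    by_cases h : q n <;> simp [h]

theorem sum_mod_congr (s : Finset Nat) (f g : Nat → Int)
    (h : ∀ k ∈ s, f k % pvMOD = g k % pvMOD) :
    (∑ k ∈ s, f k) % pvMOD = (∑ k ∈ s, g k) % pvMOD := by
  rw [Finset.sum_int_mod s pvMOD f, Finset.sum_int_mod s pvMOD g, Finset.sum_congr rfl h]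

-- ---- the A-side invariant ----

def GoodA (dp : List Int) (P : List Int) : Prop :=
  dp.length = 64 ∧ ∀ t, t < 64 → dp.getD t 0 = (E P t : Int) % pvMOD

theorem E_append (P : List Int) (a : Int) : E (P ++ [a]) = estep (E P) a := by
  unfold E
  rw [List.foldl_append]
  rfl

theorem cnt_append (P : List Int) (a : Int) (m : Nat) :
    cnt (P ++ [a]) m = cnt P m + (if jm a &&& m = m then 1 else 0) := by
  unfold cnt
  rw [List.countP_append]
  by_cases h : jm a &&& m = m <;> simp [h]

theorem pyGetD_idx (l : List Int) (hl : l.length = 64) (a : Int) (h2 : -64 ≤ a) (h3 : a < 64) :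
    PySem.List.pyGetD l a 0 = l.getD (jm a) 0 := by
  by_cases h0 : 0 ≤ a
  · rw [jm_of_nonneg a h0 h3]
    have ha : a = ((a.toNat : Nat) : Int) := by omega
    conv_lhs => rw [ha]
    rw [PySem.List.pyGetD_natCast]
  · obtain ⟨k, hk0, hk64, hak⟩ : ∃ k : Nat, 0 < k ∧ k ≤ 64 ∧ a = -((k : Nat) : Int) :=
      ⟨(-a).toNat, by omega, by omega, by omega⟩
    have hj : jm a = 64 - k := by unfold jm; omega
    rw [hj, hak, PySem.List.pyGetD_neg_natCast l k 0 hk0 (by omega),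
      List.getD_eq_getElem l 0 (by omega)]
    simp only [hl]

theorem pyIdx_eq (l : List Int) (hl : l.length = 64) (a : Int) (h2 : -64 ≤ a) (h3 : a < 64) :
    PySem.List.pyIdx? l.length a = some (jm a) := by
  unfold PySem.List.pyIdx?
  rw [hl]
  by_cases h0 : 0 ≤ a
  · rw [if_pos h0, if_pos (by omega)]
    have : a.toNat = jm a := by unfold jm; omega
    rw [this]
  · rw [if_neg h0, if_pos (by omega)]
    have : 64 - (-a).toNat = jm a := by unfold jm; omega
    rw [this]

theorem pySetD_idx (l : List Int) (hl : l.length = 64) (a : Int) (h2 : -64 ≤ a) (h3 : a < 64)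
    (v : Int) : PySem.List.pySetD l a v = l.set (jm a) v := by
  unfold PySem.List.pySetD PySem.List.pySet?
  rw [pyIdx_eq l hl a h2 h3]
  rfl

theorem fold_sets (dp : List Int) (a : Int) (h2 : -64 ≤ a) (h3 : a < 64) (ms : List Int)
    (hms : ∀ m ∈ ms, 0 ≤ m ∧ m < 64) :
    ∀ nd : List Int, nd.length = 64 →
      (ms.foldl (fun nd m => PySem.List.pySetD nd (PySem.Int.band m a)
          ((PySem.List.pyGetD nd (PySem.Int.band m a) 0 + PySem.List.pyGetD dp m 0) % pvMOD))
          nd).length = 64 ∧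
      ∀ t, t < 64 →
        (ms.foldl (fun nd m => PySem.List.pySetD nd (PySem.Int.band m a)
            ((PySem.List.pyGetD nd (PySem.Int.band m a) 0 + PySem.List.pyGetD dp m 0) % pvMOD))
            nd).getD t 0
          = seqAdd (nd.getD t 0)
              ((ms.filter (fun m => PySem.Int.band m a == (t : Int))).map
                (fun m => PySem.List.pyGetD dp m 0)) := by
  induction ms with
  | nil => intro nd hnd; exact ⟨hnd, fun t _ => rfl⟩
  | cons m tl ih =>
    intro nd hnd
    obtain ⟨hm0, hm1⟩ := hms m (List.mem_cons_self ..)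
    have hb : PySem.Int.band m a = ((m.toNat &&& jm a : Nat) : Int) := band_norm m a hm0 hm1 h2 h3
    have hi0 : m.toNat &&& jm a < 64 := lt_of_le_of_lt (Nat.and_le_left ..) (by omega)
    have hinit : PySem.List.pySetD nd (PySem.Int.band m a)
          ((PySem.List.pyGetD nd (PySem.Int.band m a) 0 + PySem.List.pyGetD dp m 0) % pvMOD)
        = nd.set (m.toNat &&& jm a) ((nd.getD (m.toNat &&& jm a) 0 + PySem.List.pyGetD dp m 0) % pvMOD) := by
      rw [hb, PySem.List.pySetD_natCast, PySem.List.pyGetD_natCast]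
    have htl := ih (fun x hx => hms x (List.mem_cons_of_mem _ hx))
      (nd.set (m.toNat &&& jm a) ((nd.getD (m.toNat &&& jm a) 0 + PySem.List.pyGetD dp m 0) % pvMOD))
      (by rw [List.length_set]; exact hnd)
    constructor
    · rw [List.foldl_cons, hinit]; exact htl.1
    · intro t ht
      rw [List.foldl_cons, hinit, htl.2 t ht, List.filter_cons]
      by_cases hit : m.toNat &&& jm a = t
      · rw [if_pos (by simp [hb, hit])]
        rw [List.map_cons]
        have : seqAdd (nd.getD t 0) (PySem.List.pyGetD dp m 0 ::
            ((tl.filter (fun m => PySem.Int.band m a == (t : Int))).map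
              (fun m => PySem.List.pyGetD dp m 0)))
            = seqAdd ((nd.getD t 0 + PySem.List.pyGetD dp m 0) % pvMOD)
              ((tl.filter (fun m => PySem.Int.band m a == (t : Int))).map
                (fun m => PySem.List.pyGetD dp m 0)) := rfl
        rw [this, hit, getD_set_self nd t _ (by omega)]
      · rw [if_neg (by simp [hb]; omega), getD_set_ne nd _ t _ hit]

-- ---- the DP step preserves the invariant ----

theorem solveStep_good (dp P : List Int) (a : Int) (h : GoodA dp P) (h2 : -64 ≤ a) (h3 : a < 64) :
    GoodA (solveStep dp a) (P ++ [a]) := by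
  obtain ⟨hl, hv⟩ := h
  have hjlt : jm a < 64 := jm_lt a
  have hset : PySem.List.pySetD dp a (PySem.List.pyGetD dp a 0 + 1)
      = dp.set (jm a) (dp.getD (jm a) 0 + 1) := by
    rw [pyGetD_idx dp hl a h2 h3, pySetD_idx dp hl a h2 h3]
  have hnd : (dp.set (jm a) (dp.getD (jm a) 0 + 1)).length = 64 := by
    rw [List.length_set]; exact hl
  have hfs := fold_sets dp a h2 h3 (PySem.List.pyRange 0 64 1)
      (fun m hm => by rw [PySem.List.mem_pyRange_one] at hm; exact hm)
      (dp.set (jm a) (dp.getD (jm a) 0 + 1)) hnd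
  unfold solveStep
  rw [hset]
  refine ⟨hfs.1, ?_⟩
  intro t ht
  rw [hfs.2 t ht]
  -- rewrite the filtered list into ℕ world
  have hr : PySem.List.pyRange 0 64 1 = (List.range 64).map (fun k : Nat => (k : Int)) := by
    rw [PySem.List.pyRange_one]
    have h1 : ((64 : Int) - 0).toNat = 64 := rfl
    rw [h1]
    simp only [zero_add]
  have hfilter : ((PySem.List.pyRange 0 64 1).filter
        (fun m => PySem.Int.band m a == (t : Int))).map (fun m => PySem.List.pyGetD dp m 0)
      = ((List.range 64).filter (fun k => k &&& jm a == t)).map (fun k => dp.getD k 0) := by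
    rw [hr, List.filter_map, List.map_map]
    rw [List.filter_congr (q := fun k => k &&& jm a == t) ?_]
    · apply List.map_congr_left
      intro k _
      simp only [Function.comp_apply, PySem.List.pyGetD_natCast]
    · intro k hk
      have hk' : k < 64 := List.mem_range.mp hk
      simp only [Function.comp_apply]
      rw [band_norm (k : Int) a (by omega) (by exact_mod_cast hk') h2 h3]
      apply Bool.eq_iff_iff.mpr
      simp only [beq_iff_eq]
      constructor
      · intro hcast
        have : (k : Int).toNat &&& jm a = t := by exact_mod_cast hcast
        simpa using this
      · intro hnat
        have : (k : Int).toNat &&& jm a = t := by simpa using hnat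
        exact_mod_cast congrArg (fun x : Nat => (x : Int)) this
  rw [hfilter, seqAdd_eq, E_append]
  have hsum := list_filter_map_sum 64 (fun k => k &&& jm a == t) (fun k => dp.getD k 0)
  by_cases hc : t &&& jm a = t
  · -- t is a submask of jm a : the filter is non-empty and every class s with s∩jm a = t contributes
    have htmem : t ∈ (List.range 64).filter (fun k => k &&& jm a == t) :=
      List.mem_filter.mpr ⟨List.mem_range.mpr ht, by simp [hc]⟩
    have hne : ((List.range 64).filter (fun k => k &&& jm a == t)).map (fun k => dp.getD k 0) ≠ [] := by
      simp only [ne_eq, List.map_eq_nil_iff]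
      exact List.ne_nil_of_mem htmem
    rw [if_neg hne, hsum]
    have hbase : (dp.set (jm a) (dp.getD (jm a) 0 + 1)).getD t 0
        = dp.getD t 0 + (if jm a = t then 1 else 0) := by
      by_cases hteq : jm a = t
      · rw [hteq, getD_set_self dp t _ (by omega), if_pos rfl]
      · rw [getD_set_ne dp (jm a) t _ hteq, if_neg hteq]
        ring
    rw [hbase, hv t ht]
    have hsum2 : (∑ k ∈ Finset.range 64, (if (k &&& jm a == t) = true then dp.getD k 0 else 0))
        = ∑ k ∈ Finset.range 64, (if k &&& jm a = t then (E P k : Int) % pvMOD else 0) := by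
      refine Finset.sum_congr rfl ?_
      intro k hk
      rw [hv k (Finset.mem_range.mp hk)]
      by_cases h5 : k &&& jm a = t <;> simp [h5]
    rw [hsum2]
    -- both sides are the same value mod pvMOD
    have hmodsum : (∑ k ∈ Finset.range 64, (if k &&& jm a = t then (E P k : Int) % pvMOD else 0)) % pvMOD
        = (∑ k ∈ Finset.range 64, (if k &&& jm a = t then (E P k : Int) else 0)) % pvMOD := by
      apply sum_mod_congr
      intro k _
      by_cases h5 : k &&& jm a = t <;> simp [h5, Int.emod_emod_of_dvd _ dvd_rfl]
    show (E P t % pvMOD + (if jm a = t then 1 else 0)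
        + ∑ k ∈ Finset.range 64, (if k &&& jm a = t then (E P k : Int) % pvMOD else 0)) % pvMOD
      = (estep (E P) a t : Int) % pvMOD
    unfold estep
    push_cast
    set S1 := ∑ k ∈ Finset.range 64, (if k &&& jm a = t then (E P k : Int) % pvMOD else 0) with hS1
    set S2 := ∑ k ∈ Finset.range 64, (if k &&& jm a = t then (E P k : Int) else 0) with hS2
    have hmod2 : S1 % pvMOD = S2 % pvMOD := hmodsum
    set c1 : Int := if jm a = t then 1 else 0 with hc1
    set e1 : Int := (E P t : Int) with he1
    simp only [pvMOD] at hmod2 ⊢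
    omega
  · -- t is not a submask: nothing changes
    have hempty : (List.range 64).filter (fun k => k &&& jm a == t) = [] := by
      apply List.filter_eq_nil_iff.mpr
      intro k _
      simp only [beq_iff_eq]
      intro hkt
      apply hc
      calc t &&& jm a = (k &&& jm a) &&& jm a := by rw [hkt]
        _ = k &&& (jm a &&& jm a) := by rw [Nat.land_assoc]
        _ = k &&& jm a := by rw [Nat.and_self]
        _ = t := hkt
    rw [hempty]
    simp only [List.map_nil, if_pos rfl]
    have htne : jm a ≠ t := by
      intro hteq
      apply hc
      rw [← hteq, Nat.and_self]
    rw [getD_set_ne dp (jm a) t _ htne, hv t ht]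
    unfold estep
    have hz : (∑ s ∈ Finset.range 64, (if s &&& jm a = t then E P s else 0)) = 0 := by
      apply Finset.sum_eq_zero
      intro s _
      rw [if_neg]
      intro hst
      apply hc
      calc t &&& jm a = (s &&& jm a) &&& jm a := by rw [hst]
        _ = s &&& (jm a &&& jm a) := by rw [Nat.land_assoc]
        _ = s &&& jm a := by rw [Nat.and_self]
        _ = t := hst
    rw [hz, if_neg htne]
    simp

theorem GoodA_foldl (A : List Int) (hA : ∀ a ∈ A, -64 ≤ a ∧ a < 64) :
    GoodA (A.foldl solveStep (List.replicate 64 0)) A := by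
  induction A using List.reverseRecOn with
  | nil =>
    refine ⟨by simp, ?_⟩
    intro t ht
    simp only [List.foldl_nil]
    rw [List.getD_replicate (0 : Int) ht]
    have hE : E [] t = 0 := rfl
    rw [hE]
    simp
  | append_singleton P a ih =>
    rw [List.foldl_append]
    simp only [List.foldl_cons, List.foldl_nil]
    have hPa := hA a (by simp)
    exact solveStep_good _ P a (ih (fun x hx => hA x (by simp [hx]))) hPa.1 hPa.2

-- ---- zeta transform of the DP table ----

theorem zsum_estep (f : Nat → Nat) (a : Int) (m : Nat) (hm : m < 64) :
    zsum (estep f a) m = zsum f m + (if jm a &&& m = m then zsum f m + 1 else 0) := by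
  have hjlt : jm a < 64 := jm_lt a
  unfold zsum estep
  have hsplit : ∀ t ∈ Finset.range 64,
      (if m &&& t = m then f t + (if jm a = t then 1 else 0)
          + ∑ s ∈ Finset.range 64, (if s &&& jm a = t then f s else 0) else 0)
      = (if m &&& t = m then f t else 0)
        + (if m &&& t = m then (if jm a = t then 1 else 0) else 0)
        + (if m &&& t = m then ∑ s ∈ Finset.range 64, (if s &&& jm a = t then f s else 0) else 0) := by
    intro t _
    by_cases h : m &&& t = m <;> simp [h]
  rw [Finset.sum_congr rfl hsplit, Finset.sum_add_distrib, Finset.sum_add_distrib]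
  have hT2 : (∑ t ∈ Finset.range 64, (if m &&& t = m then (if jm a = t then 1 else 0) else 0))
      = (if jm a &&& m = m then 1 else 0) := by
    have hpt : ∀ t ∈ Finset.range 64, (if m &&& t = m then (if jm a = t then 1 else 0) else 0)
        = (if t = jm a then (if m &&& jm a = m then 1 else 0) else 0) := by
      intro t _
      by_cases h1 : t = jm a
      · subst h1
        by_cases h2 : m &&& jm a = m <;> simp [h2]
      · have h1' : jm a ≠ t := fun h => h1 h.symm
        by_cases h2 : m &&& t = m <;> simp [h1, h1', h2]
    rw [Finset.sum_congr rfl hpt, Finset.sum_ite_eq' (Finset.range 64) (jm a) _,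
      if_pos (Finset.mem_range.mpr hjlt), Nat.land_comm]
  have hT3 : (∑ t ∈ Finset.range 64,
        (if m &&& t = m then ∑ s ∈ Finset.range 64, (if s &&& jm a = t then f s else 0) else 0))
      = (if jm a &&& m = m then zsum f m else 0) := by
    have h1 : ∀ t ∈ Finset.range 64,
        (if m &&& t = m then ∑ s ∈ Finset.range 64, (if s &&& jm a = t then f s else 0) else 0)
        = ∑ s ∈ Finset.range 64, (if m &&& t = m ∧ s &&& jm a = t then f s else 0) := by
      intro t _
      by_cases h : m &&& t = m
      · simp only [if_pos h]
        refine Finset.sum_congr rfl ?_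
        intro s _
        by_cases h2 : s &&& jm a = t <;> simp [h, h2]
      · simp [h]
    rw [Finset.sum_congr rfl h1, Finset.sum_comm]
    have h2 : ∀ s ∈ Finset.range 64,
        (∑ t ∈ Finset.range 64, (if m &&& t = m ∧ s &&& jm a = t then f s else 0))
        = (if m &&& (s &&& jm a) = m then f s else 0) := by
      intro s hs
      have h3 : ∀ t ∈ Finset.range 64, (if m &&& t = m ∧ s &&& jm a = t then f s else 0)
          = (if t = s &&& jm a then (if m &&& (s &&& jm a) = m then f s else 0) else 0) := by
        intro t _
        by_cases h4 : t = s &&& jm a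
        · subst h4
          by_cases h5 : m &&& (s &&& jm a) = m <;> simp [h5]
        · rw [if_neg h4, if_neg]
          rintro ⟨_, h5⟩
          exact h4 h5.symm
      rw [Finset.sum_congr rfl h3, Finset.sum_ite_eq' (Finset.range 64) (s &&& jm a) _,
        if_pos (Finset.mem_range.mpr
          (lt_of_le_of_lt (Nat.and_le_left ..) (Finset.mem_range.mp hs)))]
    rw [Finset.sum_congr rfl h2]
    by_cases hmj : jm a &&& m = m
    · have hmj' : m &&& jm a = m := by rw [Nat.land_comm]; exact hmj
      have h5 : ∀ s ∈ Finset.range 64, (if m &&& (s &&& jm a) = m then f s else 0)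
          = (if m &&& s = m then f s else 0) := by
        intro s _
        have : (m &&& (s &&& jm a) = m) ↔ (m &&& s = m) := by
          rw [sub_land_iff]
          constructor
          · exact fun h => h.1
          · exact fun h => ⟨h, hmj'⟩
        by_cases h6 : m &&& s = m
        · rw [if_pos (this.mpr h6), if_pos h6]
        · rw [if_neg (fun h => h6 (this.mp h)), if_neg h6]
      rw [Finset.sum_congr rfl h5, if_pos hmj]
      rfl
    · have h5 : ∀ s ∈ Finset.range 64, (if m &&& (s &&& jm a) = m then f s else 0) = 0 := by
        intro s _
        rw [if_neg]
        rw [sub_land_iff]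
        rintro ⟨_, h6⟩
        exact hmj (by rw [Nat.land_comm]; exact h6)
      rw [Finset.sum_congr rfl h5, if_neg hmj]
      exact Finset.sum_const_zero
  rw [hT2, hT3]
  by_cases h : jm a &&& m = m <;> simp [h, zsum] <;> omega

theorem zeta_E (P : List Int) : ∀ m, m < 64 → zsum (E P) m + 1 = 2 ^ (cnt P m) := by
  induction P using List.reverseRecOn with
  | nil =>
    intro m hm
    have h1 : E [] = fun _ => 0 := rfl
    have h2 : cnt [] m = 0 := rfl
    rw [h1, h2]
    simp [zsum]
  | append_singleton P a ih =>
    intro m hm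
    rw [E_append, zsum_estep (E P) a m hm, cnt_append]
    have hz := ih m hm
    by_cases h : jm a &&& m = m
    · simp only [if_pos h, pow_succ]
      omega
    · simp only [if_neg h]
      omega

theorem zeta_cast (P : List Int) (t : Nat) (ht : t < 64) :
    ((2 : Int) ^ (cnt P t) - 1)
      = ∑ s ∈ Finset.range 64, (if t &&& s = t then (E P s : Int) else 0) := by
  have h := zeta_E P t ht
  have hcast : ((zsum (E P) t : Nat) : Int) + 1 = 2 ^ cnt P t := by exact_mod_cast congrArg (fun n : Nat => (n : Int)) h
  have hz : ((zsum (E P) t : Nat) : Int)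
      = ∑ s ∈ Finset.range 64, (if t &&& s = t then (E P s : Int) else 0) := by
    unfold zsum
    push_cast
    rfl
  omega

-- ---- Möbius inversion over the 6-bit subset lattice ----

theorem K_fin (m s : Nat) (hm : m < 64) (hs : s < 64) :
    (∑ t ∈ Finset.range 64, (if m &&& t = m ∧ t &&& s = t then sgZ t m else 0))
      = if s = m then 1 else 0 := by
  have hmr : m ∈ Finset.range 64 := Finset.mem_range.mpr hm
  have hsr : s ∈ Finset.range 64 := Finset.mem_range.mpr hs
  by_cases hms : m &&& s = m
  · have hdlt : s ^^^ m < 64 := (XORP s hsr m hmr).1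
    have hK2 := K2 (s ^^^ m) (Finset.mem_range.mpr hdlt)
    rw [← Finset.sum_filter] at hK2
    rw [← Finset.sum_filter]
    have hbij : (∑ t ∈ (Finset.range 64).filter (fun t => m &&& t = m ∧ t &&& s = t), sgZ t m)
        = ∑ u ∈ (Finset.range 64).filter (fun u => u &&& (s ^^^ m) = u),
            (if pc6 u % 2 = 0 then (1 : Int) else -1) := by
      refine Finset.sum_nbij' (fun t => t ^^^ m) (fun u => u ^^^ m) ?_ ?_ ?_ ?_ ?_
      · intro t htm
        have hmem := Finset.mem_filter.mp htm
        have htr := hmem.1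
        have hc1 := hmem.2.1
        have hc2 := hmem.2.2
        refine Finset.mem_filter.mpr ⟨Finset.mem_range.mpr (XORP t htr m hmr).1, ?_⟩
        exact TB1 m s t hc1 hc2
      · intro u hum
        obtain ⟨hur, hc⟩ := Finset.mem_filter.mp hum
        refine Finset.mem_filter.mpr ⟨Finset.mem_range.mpr (XORP u hur m hmr).1, ?_⟩
        exact ⟨TB2a m s u hms hc, TB2b m s u hms hc⟩
      · intro t _
        exact Nat.xor_xor_cancel_right t m
      · intro u _
        exact Nat.xor_xor_cancel_right u m
      · intro t htm
        have htr : t ∈ Finset.range 64 := (Finset.mem_filter.mp htm).1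
        unfold sgZ
        rw [← (XORP t htr m hmr).2]
    rw [hbij, hK2]
    have hiff : (s ^^^ m = 0) ↔ (s = m) := by
      constructor
      · intro h
        exact Nat.xor_eq_zero_iff.mp h
      · intro h
        rw [h]
        exact Nat.xor_self m
    by_cases h : s = m
    · rw [if_pos (hiff.mpr h), if_pos h]
    · rw [if_neg (fun h2 => h (hiff.mp h2)), if_neg h]
  · have hne : ¬(s = m) := fun h => hms (by rw [h]; exact Nat.and_self m)
    rw [if_neg hne]
    apply Finset.sum_eq_zero
    intro t _
    rw [if_neg]
    rintro ⟨h1, h2⟩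
    apply hms
    calc m &&& s = (m &&& t) &&& s := by rw [h1]
      _ = m &&& (t &&& s) := Nat.land_assoc ..
      _ = m &&& t := by rw [h2]
      _ = m := h1

theorem mob (P : List Int) (m : Nat) (hm : m < 64) :
    (∑ t ∈ Finset.range 64, (if m &&& t = m then sgZ t m * ((2 : Int) ^ (cnt P t) - 1) else 0))
      = (E P m : Int) := by
  have step1 : (∑ t ∈ Finset.range 64, (if m &&& t = m then sgZ t m * ((2 : Int) ^ (cnt P t) - 1) else 0))
      = ∑ t ∈ Finset.range 64, ∑ s ∈ Finset.range 64,
          (if m &&& t = m ∧ t &&& s = t then sgZ t m * (E P s : Int) else 0) := by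
    refine Finset.sum_congr rfl ?_
    intro t ht
    by_cases h1 : m &&& t = m
    · rw [if_pos h1, zeta_cast P t (Finset.mem_range.mp ht), Finset.mul_sum]
      refine Finset.sum_congr rfl ?_
      intro s _
      by_cases h2 : t &&& s = t <;> simp [h1, h2]
    · simp [h1]
  rw [step1, Finset.sum_comm]
  have step2 : ∀ s ∈ Finset.range 64,
      (∑ t ∈ Finset.range 64, (if m &&& t = m ∧ t &&& s = t then sgZ t m * (E P s : Int) else 0))
      = (if s = m then 1 else 0) * (E P s : Int) := by
    intro s hs
    rw [← K_fin m s hm (Finset.mem_range.mp hs), Finset.sum_mul]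
    refine Finset.sum_congr rfl ?_
    intro t _
    by_cases h : m &&& t = m ∧ t &&& s = t <;> simp [h]
  rw [Finset.sum_congr rfl step2]
  have step3 : ∀ s ∈ Finset.range 64,
      (if s = m then 1 else 0) * (E P s : Int) = (if s = m then (E P s : Int) else 0) := by
    intro s _
    by_cases h : s = m <;> simp [h]
  rw [Finset.sum_congr rfl step3, Finset.sum_ite_eq' (Finset.range 64) m _,
    if_pos (Finset.mem_range.mpr hm)]

-- ---- each port evaluates to the common normal form ----

theorem solveA_eval (N K : Int) (A : List Int) (hA : Pre_solve N K A) :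
    solve N K A = resSpec K A := by
  have good := GoodA_foldl A hA
  simp only [solve]
  rw [foldl_pyRange64]
  rw [PySem.List.foldl_congr_mem _ _
    (fun r (k : Nat) => if ((pc6 k : Int) == K) = true
      then (r + (E A k : Int) % pvMOD) % pvMOD else r) 0 ?_]
  · have hfr := foldl_range_sum 64 (fun k => ((pc6 k : Int) == K) = true)
      (fun k => (E A k : Int) % pvMOD) 0
    rw [Int.zero_emod] at hfr
    rw [hfr, zero_add]
    rfl
  · intro acc k hk
    have hk' : k < 64 := List.mem_range.mp hk
    have h1 : ((k : Int)).toNat = k := Int.toNat_natCast k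
    rw [h1, pcA_eq_pc6 k hk', pyGetD_idx _ good.1 (k : Int) (by omega) (by exact_mod_cast hk'),
      jm_of_nonneg _ (by omega) (by exact_mod_cast hk'), h1, good.2 k hk']

theorem solveB_eval (N K : Int) (A : List Int) (hA : Pre_solve N K A) :
    solve_alt N K A = resSpec K A := by
  simp only [solve_alt]
  -- value of the g-comprehension at a mask t < 64
  have hg : ∀ t : Nat, t < 64 →
      PySem.List.pyGetD ((PySem.List.pyRange 0 64 1).map
        (fun m => A.foldl (fun c a => if PySem.Int.band a m == m then c + 1 else c) (0 : Int))) (t : Int) 0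
      = (cnt A t : Int) := by
    intro t ht
    rw [PySem.List.pyGetD_map_pyRange_of_nonneg _ 64 (t : Int) 0 (by omega) (by exact_mod_cast ht)]
    rw [PySem.List.foldl_congr_mem A _
      (fun c a => if (jm a &&& t == t) = true then c + 1 else c) 0 ?_]
    · rw [PySem.List.foldl_count_if (fun a => jm a &&& t == t) A 0, zero_add]
      rfl
    · intro acc x hx
      obtain ⟨hx1, hx2⟩ := hA x hx
      have hb : PySem.Int.band x (t : Int) = ((t &&& jm x : Nat) : Int) := by
        rw [PySem.Int.band_comm, band_norm (t : Int) x (by omega) (by exact_mod_cast ht) hx1 hx2]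
        rw [Int.toNat_natCast]
      rw [hb]
      have hcond : (((t &&& jm x : Nat) : Int) == (t : Int)) = (jm x &&& t == t) := by
        rw [Nat.land_comm t (jm x)]
        apply Bool.eq_iff_iff.mpr
        simp only [beq_iff_eq]
        exact ⟨fun h => by exact_mod_cast h, fun h => by exact_mod_cast h⟩
      rw [hcond]
  -- value of the S-comprehension at a mask t < 64
  have hS : ∀ t : Nat, t < 64 →
      PySem.List.pyGetD ((PySem.List.pyRange 0 64 1).map
        (fun m => ((2 : Int) ^ (PySem.List.pyGetD ((PySem.List.pyRange 0 64 1).map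
            (fun m => A.foldl (fun c a => if PySem.Int.band a m == m then c + 1 else c) (0 : Int))) m 0).toNat
          % pvMOD - 1) % pvMOD)) (t : Int) 0
      = ((2 : Int) ^ (cnt A t) % pvMOD - 1) % pvMOD := by
    intro t ht
    rw [PySem.List.pyGetD_map_pyRange_of_nonneg _ 64 (t : Int) 0 (by omega) (by exact_mod_cast ht)]
    rw [hg t ht, Int.toNat_natCast]
  rw [foldl_pyRange64]
  rw [PySem.List.foldl_congr_mem _ _
    (fun r (m : Nat) => if ((pc6 m : Int) == K) = true
      then (r + (E A m : Int) % pvMOD) % pvMOD else r) 0 ?_]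
  · have hfr := foldl_range_sum 64 (fun m => ((pc6 m : Int) == K) = true)
      (fun m => (E A m : Int) % pvMOD) 0
    rw [Int.zero_emod] at hfr
    rw [hfr, zero_add]
    rfl
  · intro acc m hm
    have hm' : m < 64 := List.mem_range.mp hm
    have h1 : ((m : Int)).toNat = m := Int.toNat_natCast m
    -- evaluate the inner inclusion-exclusion loop
    have hIN : (PySem.List.pyRange 0 64 1).foldl
        (fun acc t =>
          if PySem.Int.band t (m : Int) == (m : Int) then
            if (pcB t.toNat 0 - pcB ((m : Int)).toNat 0) % 2 == 0 then
              (acc + PySem.List.pyGetD ((PySem.List.pyRange 0 64 1).map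
                (fun m => ((2 : Int) ^ (PySem.List.pyGetD ((PySem.List.pyRange 0 64 1).map
                    (fun m => A.foldl (fun c a => if PySem.Int.band a m == m then c + 1 else c) (0 : Int))) m 0).toNat
                  % pvMOD - 1) % pvMOD)) t 0) % pvMOD
            else
              (acc - PySem.List.pyGetD ((PySem.List.pyRange 0 64 1).map
                (fun m => ((2 : Int) ^ (PySem.List.pyGetD ((PySem.List.pyRange 0 64 1).map
                    (fun m => A.foldl (fun c a => if PySem.Int.band a m == m then c + 1 else c) (0 : Int))) m 0).toNat
                  % pvMOD - 1) % pvMOD)) t 0) % pvMOD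
          else acc) 0
        = (E A m : Int) % pvMOD := by
      rw [foldl_pyRange64]
      rw [PySem.List.foldl_congr_mem _ _
        (fun acc (t : Nat) => if m &&& t = m
          then (acc + sgZ t m * (((2 : Int) ^ (cnt A t) % pvMOD - 1) % pvMOD)) % pvMOD
          else acc) 0 ?_]
      · have hfr := foldl_range_sum 64 (fun t => m &&& t = m)
          (fun t => sgZ t m * (((2 : Int) ^ (cnt A t) % pvMOD - 1) % pvMOD)) 0
        rw [Int.zero_emod] at hfr
        rw [hfr, zero_add]
        have hmc : (∑ t ∈ Finset.range 64,
            (if m &&& t = m then sgZ t m * (((2 : Int) ^ (cnt A t) % pvMOD - 1) % pvMOD) else 0)) % pvMOD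
            = (∑ t ∈ Finset.range 64,
            (if m &&& t = m then sgZ t m * ((2 : Int) ^ (cnt A t) - 1) else 0)) % pvMOD := by
          apply sum_mod_congr
          intro t _
          by_cases h5 : m &&& t = m
          · rw [if_pos h5, if_pos h5, Int.mul_emod (sgZ t m) _ pvMOD,
              Int.mul_emod (sgZ t m) ((2 : Int) ^ (cnt A t) - 1) pvMOD]
            have : (((2 : Int) ^ (cnt A t) % pvMOD - 1) % pvMOD) % pvMOD
                = ((2 : Int) ^ (cnt A t) - 1) % pvMOD := by
              simp only [pvMOD]
              omega
            rw [this]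
          · rw [if_neg h5, if_neg h5]
        rw [hmc, mob A m hm']
      · intro acc2 t ht
        have ht' : t < 64 := List.mem_range.mp ht
        have h2 : ((t : Int)).toNat = t := Int.toNat_natCast t
        show _ = if m &&& t = m
          then (acc2 + sgZ t m * (((2 : Int) ^ cnt A t % pvMOD - 1) % pvMOD)) % pvMOD else acc2
        rw [h2, h1, pcB_eq_pc6 t ht' 0, pcB_eq_pc6 m hm' 0, zero_add, zero_add]
        rw [PySem.Int.band_natCast, hS t ht']
        have hcond : (((t &&& m : Nat) : Int) == (m : Int)) = decide (m &&& t = m) := by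
          rw [Nat.land_comm t m]
          apply Bool.eq_iff_iff.mpr
          simp only [beq_iff_eq, decide_eq_true_eq]
          exact ⟨fun h => by exact_mod_cast h, fun h => by exact_mod_cast h⟩
        rw [hcond]
        by_cases hmt : m &&& t = m
        · rw [if_pos (show decide (m &&& t = m) = true by simp [hmt]), if_pos hmt]
          by_cases hpar : (pc6 t + pc6 m) % 2 = 0
          · have hsg : sgZ t m = 1 := by unfold sgZ; rw [if_pos hpar]
            rw [if_pos (show (((pc6 t : Int) - (pc6 m : Int)) % 2 == 0) = true
              by simp only [beq_iff_eq]; omega), hsg, one_mul]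
          · have hsg : sgZ t m = -1 := by unfold sgZ; rw [if_neg hpar]
            rw [if_neg (show ¬((((pc6 t : Int) - (pc6 m : Int)) % 2 == 0) = true)
              by simp only [beq_iff_eq]; omega), hsg]
            congr 1
            ring
        · rw [if_neg (show ¬(decide (m &&& t = m) = true) by simp [hmt]), if_neg hmt]
    show _ = if ((pc6 m : Int) == K) = true then (acc + (E A m : Int) % pvMOD) % pvMOD else acc
    rw [hIN, h1, pcB_eq_pc6 m hm' 0, zero_add]

-- ===== VERDICT (by name: the statement is the Claim_ definition above) =====
theorem solve_spec : Claim_equal_solve := by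
  intro N K A hdom hpre
  unfold Spec_solve
  rw [solveA_eval N K A hpre, solveB_eval N K A hpre]
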